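-- pv_equiv track=rewrite | github.com/OpenBrowserAI/openbrowser | bridge/app.py | _pick_first_available
-- ===== SOURCE A (Python) =====
-- from typing import Any, AsyncIterator, Dict, List, Optional, Sequence, Set, Tuple
--
-- def _pick_first_available(candidates: Sequence[str], available: Set[str]) -> Optional[str]:
--     for c in candidates:
--         if c and c in available:
--             return c
--     for c in candidates:
--         if c:
--             return c
--     return None
-- ===== SOURCE B (Python) =====
-- def _pick_first_available(candidates, available):
--     first_truthy = None
--     for c in candidates:
--         if c and c in available:
--             return c
--         if c and first_truthy is None:
--             first_truthy = c
--     return first_truthy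
-- ===== Notes on version B (the rewrite author's own statement) =====
-- stated objective: simpler
-- what changed: Replaces A's two independent scans of candidates with a single pass that returns the first available candidate immediately while maintaining a first-truthy accumulator as the deferred fallback.
import Mathlib
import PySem

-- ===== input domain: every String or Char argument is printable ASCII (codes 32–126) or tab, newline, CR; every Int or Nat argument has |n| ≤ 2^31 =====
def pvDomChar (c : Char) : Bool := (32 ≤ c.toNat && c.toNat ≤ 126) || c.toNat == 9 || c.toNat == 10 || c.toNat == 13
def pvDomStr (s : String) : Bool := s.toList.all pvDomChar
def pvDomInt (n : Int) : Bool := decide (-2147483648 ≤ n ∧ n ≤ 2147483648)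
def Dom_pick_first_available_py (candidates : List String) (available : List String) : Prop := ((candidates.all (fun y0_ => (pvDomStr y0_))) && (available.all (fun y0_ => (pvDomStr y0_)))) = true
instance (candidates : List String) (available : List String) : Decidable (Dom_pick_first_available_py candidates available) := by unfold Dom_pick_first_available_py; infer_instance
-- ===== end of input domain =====

-- B collapses A's two scans into one pass with a first-truthy accumulator (simpler); same return value everywhere.

-- ===== PORT A =====
-- first loop of A: return c for the first c that is truthy and in available
def pvALoop1 (candidates : List String) (available : List String) : Option String :=
  match candidates with
  | [] => none
  | c :: cs => if c ≠ "" ∧ c ∈ available then some c else pvALoop1 cs available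

-- second loop of A: return the first truthy c
def pvALoop2 (candidates : List String) : Option String :=
  match candidates with
  | [] => none
  | c :: cs => if c ≠ "" then some c else pvALoop2 cs

def pick_first_available_py (candidates : List String) (available : List String) : Option String :=
  match pvALoop1 candidates available with
  | some c => some c
  | none =>
    match pvALoop2 candidates with
    | some c => some c
    | none => none

-- ===== PORT B =====
-- single pass with accumulator first_truthy
def pvBLoop (candidates : List String) (available : List String) (firstTruthy : Option String) : Option String :=
  match candidates with
  | [] => firstTruthy
  | c :: cs =>
    if c ≠ "" ∧ c ∈ available then some c
    else pvBLoop cs available (if c ≠ "" ∧ firstTruthy = none then some c else firstTruthy)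

def pick_first_available_py_alt (candidates : List String) (available : List String) : Option String :=
  pvBLoop candidates available none

-- ===== PRECONDITION & SPEC =====
def Spec_pick_first_available_py (candidates : List String) (available : List String) (out : Option String) : Prop := out = pick_first_available_py_alt candidates available
instance (candidates : List String) (available : List String) (out : Option String) : Decidable (Spec_pick_first_available_py candidates available out) := by unfold Spec_pick_first_available_py; infer_instance

-- ===== CLAIM (what is proved, stated in full; the proofs are below) =====
def Claim_equal_pick_first_available_py : Prop := ∀ (candidates : List String) (available : List String), Dom_pick_first_available_py candidates available → Spec_pick_first_available_py candidates available (pick_first_available_py candidates available)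

-- ===== LEMMAS AND PROOFS =====
-- invariant of B's single pass: the accumulator is the deferred second scan
theorem pvBLoop_eq (candidates : List String) (available : List String) (acc : Option String) :
    pvBLoop candidates available acc =
      match pvALoop1 candidates available with
      | some c => some c
      | none =>
        match acc with
        | some x => some x
        | none => pvALoop2 candidates := by
  induction candidates generalizing acc with
  | nil => cases acc <;> simp [pvBLoop, pvALoop1, pvALoop2]
  | cons c cs ih =>
    by_cases h1 : c ≠ "" ∧ c ∈ available
    · simp [pvBLoop, pvALoop1, h1]
    · by_cases h2 : c = ""
      · cases acc <;> simp [pvBLoop, pvALoop1, pvALoop2, h2, ih]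
      · have h3 : c ∉ available := fun hm => h1 ⟨h2, hm⟩
        cases acc <;> simp [pvBLoop, pvALoop1, pvALoop2, h2, h3, ih]

-- ===== VERDICT (by name: the statement is the Claim_ definition above) =====
theorem pick_first_available_py_spec : Claim_equal_pick_first_available_py := by
  intro candidates available _
  unfold Spec_pick_first_available_py pick_first_available_py pick_first_available_py_alt
  rw [pvBLoop_eq]
  cases pvALoop1 candidates available <;> cases h2 : pvALoop2 candidates <;> simp
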